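-- pv_equiv track=rewrite | github.com/antfarmar/hackerrank | warmup/acmicpcteam/acmicpcteam.py | bestPair
-- ===== SOURCE A (Python) =====
-- from itertools import combinations
--
-- def bestPair(bitMaps):
--     counts = {'max': 0, 'num': 0}
--     for pair in combinations(bitMaps, 2):
--         topicsKnown = bin(int(pair[0], 2) | int(pair[1], 2)).count('1')
--         if topicsKnown > counts['max']:
--             counts['num'] = 1
--             counts['max'] = topicsKnown
--         elif topicsKnown == counts['max']:
--             counts['num'] += 1
--     return counts
-- ===== SOURCE B (Python) =====
-- from itertools import combinations
--
-- def bestPair(bitMaps):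
--     scores = [bin(int(a, 2) | int(b, 2)).count('1')
--               for a, b in combinations(bitMaps, 2)]
--     if not scores:
--         return {'max': 0, 'num': 0}
--     m = max(scores)
--     return {'max': m, 'num': scores.count(m)}
-- ===== Notes on version B (the rewrite author's own statement) =====
-- stated objective: alternative
-- what changed: Replaces A's online max/count state machine (a dict mutated with three branches per pair) by a materialize-then-aggregate decomposition: build the list of all pair scores, then take max and count in two separate reduction passes.
import Mathlib
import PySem

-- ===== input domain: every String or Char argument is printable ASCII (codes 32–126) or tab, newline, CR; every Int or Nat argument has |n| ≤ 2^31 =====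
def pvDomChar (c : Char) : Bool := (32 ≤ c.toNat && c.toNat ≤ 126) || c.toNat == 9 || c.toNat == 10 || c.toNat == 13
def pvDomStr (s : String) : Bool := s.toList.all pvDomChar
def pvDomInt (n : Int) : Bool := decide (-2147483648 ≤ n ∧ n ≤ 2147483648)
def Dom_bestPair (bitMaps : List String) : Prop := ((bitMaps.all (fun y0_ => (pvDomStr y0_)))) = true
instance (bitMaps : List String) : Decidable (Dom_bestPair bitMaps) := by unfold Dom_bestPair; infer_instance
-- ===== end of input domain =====

-- B replaces A's online max/count state machine by materialize-then-aggregate (score list, then max and count); alternative decomposition, same cost.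

-- ===== PORT A =====
-- int(s, 2), totalized with 0 (Pre_ excludes inputs where a parsed string fails, i.e. where Python raises ValueError)
def pvParse (s : String) : Int := (PySem.Int.ofStrBase? s 2).getD 0

-- bin(int(a,2) | int(b,2)).count('1') : bin shows |n| after the sign, so the '1'-count is bitCount
def pvScore (a b : String) : Int := (PySem.Int.bitCount (PySem.Int.bor (pvParse a) (pvParse b)) : Int)

def bestPair (bitMaps : List String) : List (String × Int) :=
  let counts0 : PySem.Dict String Int := PySem.Dict.ofList [("max", 0), ("num", 0)]
  ((PySem.List.combinations bitMaps 2).foldl (fun counts pair =>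
      let topicsKnown : Int := pvScore (PySem.List.pyGetD pair 0 "") (PySem.List.pyGetD pair 1 "")
      if counts.getD "max" 0 < topicsKnown then
        (counts.insert "num" 1).insert "max" topicsKnown
      else if topicsKnown = counts.getD "max" 0 then
        counts.insert "num" (counts.getD "num" 0 + 1)
      else counts) counts0).items

-- ===== PORT B =====
def bestPair_alt (bitMaps : List String) : List (String × Int) :=
  let scores : List Int := (PySem.List.combinations bitMaps 2).map
      (fun pair => pvScore (PySem.List.pyGetD pair 0 "") (PySem.List.pyGetD pair 1 ""))
  match PySem.List.max? scores (fun x => x) with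
  | none => [("max", 0), ("num", 0)]
  | some m => [("max", m), ("num", (scores.count m : Int))]

-- ===== PRECONDITION & SPEC =====
-- Pre_ excludes exactly the inputs where Python A raises ValueError: with ≥ 2 strings, every string is parsed by int(s, 2).
def Pre_bestPair (bitMaps : List String) : Prop :=
  bitMaps.length ≤ 1 ∨ ∀ s ∈ bitMaps, (PySem.Int.ofStrBase? s 2).isSome = true
instance (bitMaps : List String) : Decidable (Pre_bestPair bitMaps) := by unfold Pre_bestPair; infer_instance

def pvWitness_bestPair : List String := ["1", "10", "110"]

def Spec_bestPair (bitMaps : List String) (out : List (String × Int)) : Prop := out = bestPair_alt bitMaps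
instance (bitMaps : List String) (out : List (String × Int)) : Decidable (Spec_bestPair bitMaps out) := by unfold Spec_bestPair; infer_instance

-- ===== CLAIM (what is proved, stated in full; the proofs are below) =====
def Claim_equal_bestPair : Prop := ∀ (bitMaps : List String), Dom_bestPair bitMaps → Pre_bestPair bitMaps → Spec_bestPair bitMaps (bestPair bitMaps)

-- ===== LEMMAS AND PROOFS =====

-- A's running (max, num) state as a pure pair transition
def pvStep (s : Int × Int) (t : Int) : Int × Int :=
  if s.1 < t then (t, 1) else if t = s.1 then (s.1, s.2 + 1) else s

-- one dict update step of A equals pvStep on the two-entry dict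
lemma pv_dict_step (m n t : Int) :
    (if (PySem.Dict.ofList [("max", m), ("num", n)]).getD "max" 0 < t then
        ((PySem.Dict.ofList [("max", m), ("num", n)]).insert "num" 1).insert "max" t
      else if t = (PySem.Dict.ofList [("max", m), ("num", n)]).getD "max" 0 then
        (PySem.Dict.ofList [("max", m), ("num", n)]).insert "num"
          ((PySem.Dict.ofList [("max", m), ("num", n)]).getD "num" 0 + 1)
      else PySem.Dict.ofList [("max", m), ("num", n)])
    = PySem.Dict.ofList [("max", (pvStep (m, n) t).1), ("num", (pvStep (m, n) t).2)] := by
  have h1 : (PySem.Dict.ofList [("max", m), ("num", n)]).getD "max" 0 = m := rfl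
  have h2 : (PySem.Dict.ofList [("max", m), ("num", n)]).getD "num" 0 = n := rfl
  rw [h1, h2]
  unfold pvStep
  simp only []
  split_ifs with hA hB <;> rfl

-- the whole dict loop is the pvStep fold
lemma pv_dict_loop (ts : List Int) (m n : Int) :
    ts.foldl (fun counts t =>
        if counts.getD "max" 0 < t then (counts.insert "num" 1).insert "max" t
        else if t = counts.getD "max" 0 then counts.insert "num" (counts.getD "num" 0 + 1)
        else counts) (PySem.Dict.ofList [("max", m), ("num", n)])
    = PySem.Dict.ofList [("max", (ts.foldl pvStep (m, n)).1), ("num", (ts.foldl pvStep (m, n)).2)] := by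
  induction ts generalizing m n with
  | nil => rfl
  | cons t ts ih =>
    simp only [List.foldl_cons, pv_dict_step m n t]
    exact ih _ _

-- the pvStep fold computes the running max and the count of the final max
lemma pv_step_fold (ts : List Int) (m n : Int) :
    ts.foldl pvStep (m, n) =
      (ts.foldl max m,
       if ts.foldl max m = m then n + (ts.count (ts.foldl max m) : Int)
       else (ts.count (ts.foldl max m) : Int)) := by
  induction ts generalizing m n with
  | nil => simp
  | cons t ts ih =>
    have hle := (PySem.List.le_foldl_max ts t).1
    have hlem := (PySem.List.le_foldl_max ts m).1
    simp only [List.foldl_cons]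
    by_cases h1 : m < t
    · have hmt : max m t = t := max_eq_right h1.le
      have hst : pvStep (m, n) t = (t, 1) := by simp [pvStep, h1]
      rw [hst, ih, hmt]
      have hMne : List.foldl max t ts ≠ m := by omega
      by_cases h2 : List.foldl max t ts = t
      · simp [h2]
        omega
      · have hne : ¬ ((t == List.foldl max t ts) = true) := by
          simp [beq_iff_eq]; omega
        simp [h2, hMne, List.count_cons, hne]
    · by_cases h2 : t = m
      · have hmt : max m t = m := by omega
        have hst : pvStep (m, n) t = (m, n + 1) := by simp [pvStep, h2]
        rw [hst, ih, hmt]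
        by_cases h3 : List.foldl max m ts = m
        · simp [h3, h2]
          omega
        · have hne : ¬ ((t == List.foldl max m ts) = true) := by
            simp [beq_iff_eq]; omega
          simp [h3, List.count_cons, hne]
      · have hmt : max m t = m := by omega
        have hst : pvStep (m, n) t = (m, n) := by simp [pvStep, h1, h2]
        rw [hst, ih, hmt]
        have hne : ¬ ((t == List.foldl max m ts) = true) := by
          simp [beq_iff_eq]; omega
        simp [List.count_cons, hne]

lemma pv_score_nonneg (a b : String) : 0 ≤ pvScore a b := Int.natCast_nonneg _

-- ===== VERDICT (by name: the statement is the Claim_ definition above) =====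
theorem bestPair_spec : Claim_equal_bestPair := by
  intro bitMaps _ _
  show bestPair bitMaps = bestPair_alt bitMaps
  simp only [bestPair, bestPair_alt]
  set scores : List Int := (PySem.List.combinations bitMaps 2).map
      (fun pair => pvScore (PySem.List.pyGetD pair 0 "") (PySem.List.pyGetD pair 1 "")) with hscores
  have hA : (PySem.List.combinations bitMaps 2).foldl (fun counts pair =>
        let topicsKnown : Int := pvScore (PySem.List.pyGetD pair 0 "") (PySem.List.pyGetD pair 1 "")
        if counts.getD "max" 0 < topicsKnown then (counts.insert "num" 1).insert "max" topicsKnown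
        else if topicsKnown = counts.getD "max" 0 then counts.insert "num" (counts.getD "num" 0 + 1)
        else counts) (PySem.Dict.ofList [("max", 0), ("num", 0)])
      = scores.foldl (fun counts t =>
        if counts.getD "max" 0 < t then (counts.insert "num" 1).insert "max" t
        else if t = counts.getD "max" 0 then counts.insert "num" (counts.getD "num" 0 + 1)
        else counts) (PySem.Dict.ofList [("max", 0), ("num", 0)]) := by
    rw [hscores, List.foldl_map]
  rw [hA, pv_dict_loop, pv_step_fold]
  cases hs : scores with
  | nil => rfl
  | cons s rest =>
    have hs0 : 0 ≤ s := by
      have hmem : s ∈ scores := by rw [hs]; exact List.mem_cons_self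
      rw [hscores] at hmem
      obtain ⟨p, _, hp⟩ := List.mem_map.mp hmem
      rw [← hp]; exact pv_score_nonneg _ _
    rw [PySem.List.max?_id_cons]
    have hmax : (s :: rest).foldl max 0 = rest.foldl max s := by
      simp [List.foldl_cons, max_eq_right hs0]
    rw [hmax]
    by_cases hM : rest.foldl max s = 0
    · rw [if_pos hM, hM, zero_add]
      rfl
    · rw [if_neg hM]
      rfl
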